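-- pv_equiv track=rewrite | github.com/kutoga/yapsl | yapsl/sms_gateway.py | _pdu_encode_phone_nr
-- ===== SOURCE A (Python) =====
-- def _pdu_encode_phone_nr(nr):
--     is_international = nr.startswith('+')
--     if is_international:
--         nr = nr[1:]
--
--     nr_len = len(nr)
--     if len(nr) % 2 == 1:
--         nr += 'F' # see: http://subnets.ru/saved/sms_pdu_format.html
--
--     # swap "pairs" of characters. E.g.: 123456... => 214365...
--     encoded_nr = ''.join(nr[i * 2:i * 2 + 2][::-1] for i in range(len(nr) // 2))
--
--     return ''.join([
--         f'{nr_len:02X}',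
--         '91' if is_international else '81',
--         encoded_nr
--     ])
-- ===== SOURCE B (Python) =====
-- def _pdu_encode_phone_nr(nr):
--     if nr.startswith('+'):
--         body, marker = nr[1:], '91'
--     else:
--         body, marker = nr, '81'
--     out = []
--     i = 0
--     while i + 1 < len(body):
--         out.append(body[i + 1])
--         out.append(body[i])
--         i += 2
--     if i < len(body):
--         out.append('F')
--         out.append(body[i])
--     return '%02X%s%s' % (len(body), marker, ''.join(out))
-- ===== Notes on version B (the rewrite author's own statement) =====
-- stated objective: alternative
-- what changed: Replaces the range/slice pair-reversal comprehension (index arithmetic nr[i*2:i*2+2][::-1] over range(len//2) after padding) with a single pairwise walk over the unpadded number that swaps two characters at a time and emits the 'F' pad inline on a leftover odd character.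
import Mathlib
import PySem

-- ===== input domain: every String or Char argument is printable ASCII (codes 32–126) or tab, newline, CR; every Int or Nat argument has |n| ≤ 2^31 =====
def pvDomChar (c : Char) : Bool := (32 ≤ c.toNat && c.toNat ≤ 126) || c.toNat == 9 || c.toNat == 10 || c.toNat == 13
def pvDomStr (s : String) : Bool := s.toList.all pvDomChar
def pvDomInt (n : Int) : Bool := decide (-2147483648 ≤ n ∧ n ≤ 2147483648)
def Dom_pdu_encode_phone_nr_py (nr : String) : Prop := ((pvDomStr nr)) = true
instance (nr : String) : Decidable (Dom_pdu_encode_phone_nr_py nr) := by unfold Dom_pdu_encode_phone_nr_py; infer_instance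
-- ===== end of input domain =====

-- B replaces the range/slice pair-reversal comprehension with a single pairwise walk that
-- swaps two characters at a time and emits the 'F' pad inline on an odd tail (objective: alternative).

-- shared helper: '%02X' / f'{n:02X}' for n ≥ 0 (both Pythons format the length this way)
def pvHexDigit (n : Nat) : Char := if n < 10 then Char.ofNat (48 + n) else Char.ofNat (55 + n)

def pvHexChars (n : Nat) : List Char :=
  if n < 16 then [pvHexDigit n]
  else pvHexChars (n / 16) ++ [pvHexDigit (n % 16)]
  decreasing_by exact Nat.div_lt_self (by omega) (by omega)

def pvHex2 (n : Nat) : List Char :=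
  List.replicate (2 - (pvHexChars n).length) '0' ++ pvHexChars n

-- ===== PORT A =====
def pdu_encode_phone_nr_py (nr : String) : String :=
  let is_international := PySem.Str.startswith nr "+"
  let cs := if is_international then PySem.List.slice nr.toList (some 1) none else nr.toList
  let nr_len := cs.length
  let cs2 := if cs.length % 2 == 1 then cs ++ ['F'] else cs
  -- ''.join(nr[i*2:i*2+2][::-1] for i in range(len(nr)//2)); [::-1] is reverse
  -- (PySem.List.slice?_none_none_neg_one), ''.join of char-list pieces is flatten
  let encoded := ((PySem.List.pyRange 0 ((cs2.length / 2 : Nat) : Int) 1).map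
      (fun i => (PySem.List.slice cs2 (some (i * 2)) (some (i * 2 + 2))).reverse)).flatten
  String.ofList (pvHex2 nr_len ++ (if is_international then "91" else "81").toList ++ encoded)

-- ===== PORT B =====
-- the while-loop of Source B: swap pairs; a leftover single char becomes 'F' + char
def pvSwapPairs : List Char → List Char
  | a :: b :: rest => b :: a :: pvSwapPairs rest
  | [c] => ['F', c]
  | [] => []

def pdu_encode_phone_nr_py_alt (nr : String) : String :=
  let p := if PySem.Str.startswith nr "+"
    then (PySem.List.slice nr.toList (some 1) none, "91")
    else (nr.toList, "81")
  String.ofList (pvHex2 p.1.length ++ p.2.toList ++ pvSwapPairs p.1)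

-- ===== PRECONDITION & SPEC =====
def Spec_pdu_encode_phone_nr_py (nr : String) (out : String) : Prop := out = pdu_encode_phone_nr_py_alt nr
instance (nr : String) (out : String) : Decidable (Spec_pdu_encode_phone_nr_py nr out) := by unfold Spec_pdu_encode_phone_nr_py; infer_instance

-- ===== CLAIM (what is proved, stated in full; the proofs are below) =====
def Claim_equal_pdu_encode_phone_nr_py : Prop := ∀ (nr : String), Dom_pdu_encode_phone_nr_py nr → Spec_pdu_encode_phone_nr_py nr (pdu_encode_phone_nr_py nr)

-- ===== LEMMAS AND PROOFS =====

-- padding an odd-length list with 'F' does not change pvSwapPairs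
theorem pvSwapPairs_append_F : ∀ (cs : List Char), cs.length % 2 = 1 →
    pvSwapPairs (cs ++ ['F']) = pvSwapPairs cs
  | [], h => by simp at h
  | [c], _ => by simp [pvSwapPairs]
  | a :: b :: rest, h => by
    simp only [List.cons_append, pvSwapPairs]
    rw [pvSwapPairs_append_F rest (by simp [List.length_cons] at h; omega)]

-- the A-side comprehension on an even-length list is the pairwise swap
theorem encEven (n : Nat) : ∀ (ds : List Char), ds.length = 2 * n →
    ((List.range n).map (fun k => ((ds.drop (2 * k)).take 2).reverse)).flatten = pvSwapPairs ds := by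
  induction n with
  | zero => intro ds h; simp at h; simp [h, pvSwapPairs]
  | succ n ih =>
    intro ds h
    match ds with
    | a :: b :: rest =>
      rw [List.range_succ_eq_map]
      simp only [List.map_cons, List.map_map, List.flatten_cons, pvSwapPairs]
      have : ((rest.length : Nat)) = 2 * n := by simpa [Nat.mul_succ] using h
      rw [← ih rest this]
      congr 1
    | [] => simp at h
    | [a] => simp [Nat.mul_succ] at h

-- cast the Int-slice comprehension to the Nat form
theorem encode_eq_swap (cs : List Char) :
    (((PySem.List.pyRange 0 (((if cs.length % 2 == 1 then cs ++ ['F'] else cs).length / 2 : Nat) : Int) 1).map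
      (fun i => (PySem.List.slice (if cs.length % 2 == 1 then cs ++ ['F'] else cs)
        (some (i * 2)) (some (i * 2 + 2))).reverse)).flatten) = pvSwapPairs cs := by
  set ds := (if cs.length % 2 == 1 then cs ++ ['F'] else cs) with hds
  have hlen : ds.length = 2 * (ds.length / 2) := by
    have : ds.length % 2 = 0 := by
      by_cases h : cs.length % 2 = 1
      · simp [hds, h, Nat.add_mod]
      · simp [hds, h]; omega
    omega
  have hslice : ∀ k : Nat,
      PySem.List.slice ds (some ((k : Int) * 2)) (some ((k : Int) * 2 + 2)) = (ds.drop (2 * k)).take 2 := by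
    intro k
    have h1 : ((k : Int) * 2) = ((2 * k : Nat) : Int) := by push_cast; ring
    have h2 : ((2 * k : Nat) : Int) + 2 = (((2 * k + 2) : Nat) : Int) := by push_cast; ring
    rw [h1, h2, PySem.List.slice_natCast]
    simp
  rw [PySem.List.pyRange_one]
  simp only [Int.sub_zero, Int.toNat_natCast, List.map_map]
  have hmap : ∀ k ∈ List.range (ds.length / 2),
      ((fun i => (PySem.List.slice ds (some (i * 2)) (some (i * 2 + 2))).reverse) ∘ fun k : Nat => (0 : Int) + ↑k) k
      = (fun k => ((ds.drop (2 * k)).take 2).reverse) k := by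
    intro k _
    simp [Function.comp, hslice k]
  rw [List.map_congr_left hmap, encEven (ds.length / 2) ds hlen]
  by_cases h : cs.length % 2 = 1
  · rw [hds]; simp only [h]; simp
    exact pvSwapPairs_append_F cs h
  · rw [hds]; simp [h]

-- ===== VERDICT (by name: the statement is the Claim_ definition above) =====
theorem pdu_encode_phone_nr_py_spec : Claim_equal_pdu_encode_phone_nr_py := by
  intro nr _
  show pdu_encode_phone_nr_py nr = pdu_encode_phone_nr_py_alt nr
  unfold pdu_encode_phone_nr_py pdu_encode_phone_nr_py_alt
  by_cases h : PySem.Str.startswith nr "+" = true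
  · simp only [h, if_true]
    rw [encode_eq_swap]
  · simp only [h, if_false, Bool.false_eq_true]
    rw [encode_eq_swap]
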